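-- pv_equiv track=rewrite | github.com/Mechachleopteryx/benchmark-RNA | benchmark_msa.py | compareRefAndCorrectedHeaders
-- ===== SOURCE A (Python) =====
-- def compareRefAndCorrectedHeaders(refIsoformTypesToCounts, correcIsoformTypesToCounts):
-- 	count = dict()
-- 	for typeIsoform in refIsoformTypesToCounts.keys():
-- 		count[typeIsoform] = dict()
-- 		for correcIsoform in correcIsoformTypesToCounts.keys():
-- 			for headersRef in refIsoformTypesToCounts[typeIsoform]:
-- 				for headersCor in correcIsoformTypesToCounts[correcIsoform]:
-- 					if headersRef == headersCor:
-- 						if correcIsoform in count[typeIsoform].keys():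
-- 							count[typeIsoform][correcIsoform] += 1
-- 						else:
-- 							count[typeIsoform][correcIsoform] = 1
-- 	return count #for instance {'exclusion': {'exclusion': 5}, 'inclusion': {'inclusion': 5}}
-- ===== SOURCE B (Python) =====
-- def compareRefAndCorrectedHeaders(refIsoformTypesToCounts, correcIsoformTypesToCounts):
-- 	# Inverted index: header -> positions of the corrected types containing it (with
-- 	# multiplicity). Each ref type then only touches corrected types it actually shares
-- 	# a header with, instead of an all-pairs comparison over every (type, type) cell.
-- 	corKeys = list(correcIsoformTypesToCounts.keys())
-- 	headerToPositions = {}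
-- 	for pos, headers in enumerate(correcIsoformTypesToCounts.values()):
-- 		for h in headers:
-- 			headerToPositions.setdefault(h, []).append(pos)
-- 	count = {}
-- 	for typeIsoform, refHeaders in refIsoformTypesToCounts.items():
-- 		totals = {}
-- 		for h in refHeaders:
-- 			for pos in headerToPositions.get(h, []):
-- 				totals[pos] = totals.get(pos, 0) + 1
-- 		inner = {}
-- 		for pos in sorted(totals):
-- 			inner[corKeys[pos]] = totals[pos]
-- 		count[typeIsoform] = inner
-- 	return count
-- ===== Notes on version B (the rewrite author's own statement) =====
-- stated objective: faster
-- what changed: Instead of comparing every ref header with every corrected header for every pair of isoform types, B builds one inverted index from header to corrected-type positions, accumulates per-ref-type totals only for corrected types that actually share a header, and emits them in sorted position (= original key) order.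
import Mathlib
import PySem

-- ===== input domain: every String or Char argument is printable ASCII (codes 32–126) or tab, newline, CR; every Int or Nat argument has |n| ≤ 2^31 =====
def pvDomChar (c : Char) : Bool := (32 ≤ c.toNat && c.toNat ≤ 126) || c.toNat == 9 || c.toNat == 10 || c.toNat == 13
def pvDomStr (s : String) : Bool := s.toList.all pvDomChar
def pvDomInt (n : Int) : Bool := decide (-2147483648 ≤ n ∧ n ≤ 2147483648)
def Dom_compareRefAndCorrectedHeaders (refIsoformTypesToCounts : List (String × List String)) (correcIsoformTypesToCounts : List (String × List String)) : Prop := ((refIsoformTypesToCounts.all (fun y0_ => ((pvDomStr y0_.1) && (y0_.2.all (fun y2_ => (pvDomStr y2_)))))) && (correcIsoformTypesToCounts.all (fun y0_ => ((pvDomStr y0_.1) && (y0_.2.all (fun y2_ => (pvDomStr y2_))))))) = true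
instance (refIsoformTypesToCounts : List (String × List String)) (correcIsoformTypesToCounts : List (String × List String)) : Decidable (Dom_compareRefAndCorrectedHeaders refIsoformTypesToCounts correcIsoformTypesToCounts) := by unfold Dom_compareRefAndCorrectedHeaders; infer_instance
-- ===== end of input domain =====

-- B replaces A's all-pairs header comparison over every (ref type, corrected type) cell by
-- an inverted header->positions index, touching only cells that share a header (objective: faster).


-- ===== PORT A =====
-- A iterates the dicts' keys and indexes back into them; since the Python arguments are
-- dicts (distinct keys, see Pre_), iterating the (key, value) pairs is the same thing.
def compareRefAndCorrectedHeaders (refIsoformTypesToCounts : List (String × List String)) (correcIsoformTypesToCounts : List (String × List String)) : List (String × List (String × Int)) :=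
  let count : PySem.Dict String (PySem.Dict String Int) :=
    refIsoformTypesToCounts.foldl (fun count tp =>
      let count := count.insert tp.1 PySem.Dict.empty
      correcIsoformTypesToCounts.foldl (fun count cp =>
        tp.2.foldl (fun count headersRef =>
          cp.2.foldl (fun count headersCor =>
            if headersRef == headersCor then
              let inner := count.getD tp.1 PySem.Dict.empty
              if inner.contains cp.1 then
                count.insert tp.1 (inner.insert cp.1 (inner.getD cp.1 0 + 1))
              else
                count.insert tp.1 (inner.insert cp.1 1)
            else count) count) count) count) PySem.Dict.empty
  count.items.map (fun p => (p.1, p.2.items))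

-- ===== PORT B =====
-- `headerToPositions.setdefault(h, []).append(pos)` is ported as `Dict.modify h [] (· ++ [pos])`
-- (same first-insertion position, same appended value); `totals[pos] = totals.get(pos, 0) + 1`
-- as `Dict.insert`; `corKeys[pos]` via `pyGet?` with a default that is never used because every
-- stored position is a valid index of corKeys.
def compareRefAndCorrectedHeaders_alt (refIsoformTypesToCounts : List (String × List String)) (correcIsoformTypesToCounts : List (String × List String)) : List (String × List (String × Int)) :=
  let corKeys : List String := correcIsoformTypesToCounts.map Prod.fst
  let headerToPositions : PySem.Dict String (List Int) :=
    (PySem.List.enumerate (correcIsoformTypesToCounts.map Prod.snd)).foldl (fun index ph =>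
      ph.2.foldl (fun index h => index.modify h [] (fun ps => ps ++ [ph.1])) index) PySem.Dict.empty
  refIsoformTypesToCounts.foldl (fun count tp =>
    let totals : PySem.Dict Int Int :=
      tp.2.foldl (fun totals h =>
        (headerToPositions.getD h []).foldl (fun totals pos =>
          totals.insert pos (totals.getD pos 0 + 1)) totals) PySem.Dict.empty
    let inner : PySem.Dict String Int :=
      (PySem.List.sorted totals.keys (fun x => x) false).foldl (fun inner pos =>
        inner.insert ((PySem.List.pyGet? corKeys pos).getD "") (totals.getD pos 0)) PySem.Dict.empty
    count ++ [(tp.1, inner.items)]) []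

-- ===== PRECONDITION & SPEC =====
-- The Python arguments are dicts, whose keys are distinct by construction; Pre_ states
-- exactly that for the association-list encoding (it excludes no actual input of A).
def Pre_compareRefAndCorrectedHeaders (refIsoformTypesToCounts : List (String × List String)) (correcIsoformTypesToCounts : List (String × List String)) : Prop :=
  (refIsoformTypesToCounts.map Prod.fst).Nodup ∧ (correcIsoformTypesToCounts.map Prod.fst).Nodup
instance (refIsoformTypesToCounts : List (String × List String)) (correcIsoformTypesToCounts : List (String × List String)) : Decidable (Pre_compareRefAndCorrectedHeaders refIsoformTypesToCounts correcIsoformTypesToCounts) := by unfold Pre_compareRefAndCorrectedHeaders; infer_instance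

def pvWitness_compareRefAndCorrectedHeaders : (List (String × List String)) × (List (String × List String)) :=
  ([("inclusion", ["h1", "h2", "h1"]), ("exclusion", ["h3"])],
   [("inclusion", ["h1", "h1", "h4"]), ("exclusion", ["h3", "h2"])])

def Spec_compareRefAndCorrectedHeaders (refIsoformTypesToCounts : List (String × List String)) (correcIsoformTypesToCounts : List (String × List String)) (out : List (String × List (String × Int))) : Prop := out = compareRefAndCorrectedHeaders_alt refIsoformTypesToCounts correcIsoformTypesToCounts
instance (refIsoformTypesToCounts : List (String × List String)) (correcIsoformTypesToCounts : List (String × List String)) (out : List (String × List (String × Int))) : Decidable (Spec_compareRefAndCorrectedHeaders refIsoformTypesToCounts correcIsoformTypesToCounts out) := by unfold Spec_compareRefAndCorrectedHeaders; infer_instance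

-- ===== CLAIM (what is proved, stated in full; the proofs are below) =====
def Claim_equal_compareRefAndCorrectedHeaders : Prop := ∀ (refIsoformTypesToCounts : List (String × List String)) (correcIsoformTypesToCounts : List (String × List String)), Dom_compareRefAndCorrectedHeaders refIsoformTypesToCounts correcIsoformTypesToCounts → Pre_compareRefAndCorrectedHeaders refIsoformTypesToCounts correcIsoformTypesToCounts → Spec_compareRefAndCorrectedHeaders refIsoformTypesToCounts correcIsoformTypesToCounts (compareRefAndCorrectedHeaders refIsoformTypesToCounts correcIsoformTypesToCounts)

-- ===== LEMMAS AND PROOFS =====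

-- total number of matching (ref header, corrected header) pairs for one cell
def pvN (r : List String) (c : List String) : Nat := (r.map (fun h => c.count h)).sum

-- "bump key c by n" on an inner counter dict
def pvBump (v : PySem.Dict String Int) (c : String) (n : Nat) : PySem.Dict String Int :=
  v.insert c (v.getD c 0 + (n : Int))

theorem pvBump_bump (v : PySem.Dict String Int) (c : String) (m n : Nat) :
    pvBump (pvBump v c m) c n = pvBump v c (m + n) := by
  unfold pvBump
  rw [PySem.Dict.insert_insert_self, PySem.Dict.getD_insert_self]
  push_cast; ring_nf

theorem pvLiftFold {α : Type} (t : String) (l : List α)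
    (step : PySem.Dict String (PySem.Dict String Int) → α → PySem.Dict String (PySem.Dict String Int))
    (istep : PySem.Dict String Int → α → PySem.Dict String Int)
    (h : ∀ (d : PySem.Dict String (PySem.Dict String Int)) (v : PySem.Dict String Int) (x : α), step (d.insert t v) x = d.insert t (istep v x)) :
    ∀ (d : PySem.Dict String (PySem.Dict String Int)) (v : PySem.Dict String Int),
      l.foldl step (d.insert t v) = d.insert t (l.foldl istep v) := by
  induction l with
  | nil => intro d v; rfl
  | cons x l ih => intro d v; simp only [List.foldl_cons, h, ih]

theorem pvFoldl_cond_bump {α : Type} (c : String) (f : α → Nat) (l : List α) :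
    ∀ v : PySem.Dict String Int,
      l.foldl (fun v x => if f x = 0 then v else pvBump v c (f x)) v
        = if (l.map f).sum = 0 then v else pvBump v c ((l.map f).sum) := by
  induction l with
  | nil => intro v; simp
  | cons x l ih =>
      intro v
      by_cases hx : f x = 0
      · simp [hx, ih]
      · by_cases hs : (l.map f).sum = 0
        · simp [hx, hs, ih]
        · have hne : f x + (l.map f).sum ≠ 0 := by omega
          simp [hx, hs, ih, pvBump_bump]

theorem pvBranch_eq_bump (v : PySem.Dict String Int) (c : String) :
    (if v.contains c then v.insert c (v.getD c 0 + 1) else v.insert c 1) = pvBump v c 1 := by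
  by_cases h : v.contains c = true
  · simp [h, pvBump]
  · have h' : v.contains c = false := by simpa using h
    rw [if_neg (by simp [h']), pvBump, PySem.Dict.getD_of_not_contains _ _ h']
    norm_num

theorem pvSum_ite_eq_count (hr : String) (l : List String) :
    (l.map (fun hc => if hr == hc then (1 : Nat) else 0)).sum = l.count hr := by
  induction l with
  | nil => rfl
  | cons x l ih =>
      simp only [List.map_cons, List.sum_cons, List.count_cons, beq_iff_eq] at *
      by_cases h : hr = x
      · subst h; omega
      · simp only [if_neg h, if_neg (Ne.symm h)]; omega

-- the canonical per-cell inner dict A builds for one ref type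
def pvInnerDict (r : List String) (cor : List (String × List String)) : PySem.Dict String Int :=
  cor.foldl (fun v cp => if pvN r cp.2 = 0 then v else pvBump v cp.1 (pvN r cp.2)) PySem.Dict.empty

-- the inner association list B builds for one ref type
def pvInnerList (r : List String) (cor : List (String × List String)) : List (String × Int) :=
  cor.foldl (fun acc cp => if pvN r cp.2 = 0 then acc else acc ++ [(cp.1, (pvN r cp.2 : Int))]) []

theorem pvInnerDict_items (r : List String) :
    ∀ (cor : List (String × List String)) (v : PySem.Dict String Int),
      v.keys.Nodup → (cor.map Prod.fst).Nodup → (∀ cp ∈ cor, v.contains cp.1 = false) →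
      (cor.foldl (fun v cp => if pvN r cp.2 = 0 then v else pvBump v cp.1 (pvN r cp.2)) v).items
        = cor.foldl (fun acc cp => if pvN r cp.2 = 0 then acc else acc ++ [(cp.1, (pvN r cp.2 : Int))]) v.items := by
  intro cor
  induction cor with
  | nil => intro v _ _ _; rfl
  | cons cp cor ih =>
      intro v hv hnd hfresh
      by_cases h0 : pvN r cp.2 = 0
      · simp only [List.foldl_cons, h0, if_true]
        exact ih v hv (by simpa using hnd.of_cons) (fun q hq => hfresh q (List.mem_cons_of_mem _ hq))
      · have hc : v.contains cp.1 = false := hfresh cp (List.mem_cons_self ..)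
        have hitems : (pvBump v cp.1 (pvN r cp.2)).items = v.items ++ [(cp.1, (pvN r cp.2 : Int))] := by
          unfold pvBump
          rw [PySem.Dict.items_insert_of_not_contains _ _ hc,
              PySem.Dict.getD_of_not_contains _ _ hc]
          simp
        simp only [List.foldl_cons]
        rw [if_neg h0, if_neg h0, ih (pvBump v cp.1 (pvN r cp.2))
              (by unfold pvBump; exact PySem.Dict.nodup_keys_insert _ _ _ hv)
              (by simpa using hnd.of_cons)
              (by
                intro q hq
                have hq1 : q.1 ≠ cp.1 := by
                  intro he
                  have : cp.1 ∈ cor.map Prod.fst := by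
                    exact he ▸ List.mem_map_of_mem hq
                  exact (List.nodup_cons.mp (by simpa using hnd)).1 this
                unfold pvBump
                rw [PySem.Dict.contains_insert]
                simp [hq1, hfresh q (List.mem_cons_of_mem _ hq)]),
            hitems]

-- one outer step of A is an insert of the canonical inner dict
theorem pvOuterStep (cor : List (String × List String)) (tp : String × List String)
    (count : PySem.Dict String (PySem.Dict String Int)) :
    (cor.foldl (fun count cp =>
        tp.2.foldl (fun count headersRef =>
          cp.2.foldl (fun count headersCor =>
            if headersRef == headersCor then
              let inner := count.getD tp.1 PySem.Dict.empty
              if inner.contains cp.1 then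
                count.insert tp.1 (inner.insert cp.1 (inner.getD cp.1 0 + 1))
              else
                count.insert tp.1 (inner.insert cp.1 1)
            else count) count) count) (count.insert tp.1 PySem.Dict.empty))
      = count.insert tp.1 (pvInnerDict tp.2 cor) := by
  have h3 : ∀ (cp : String × List String) (hr : String)
      (d : PySem.Dict String (PySem.Dict String Int)) (v : PySem.Dict String Int) (hc : String),
      (if hr == hc then
          let inner := (d.insert tp.1 v).getD tp.1 PySem.Dict.empty
          if inner.contains cp.1 then
            (d.insert tp.1 v).insert tp.1 (inner.insert cp.1 (inner.getD cp.1 0 + 1))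
          else
            (d.insert tp.1 v).insert tp.1 (inner.insert cp.1 1)
        else (d.insert tp.1 v))
        = d.insert tp.1 (if hr == hc then pvBump v cp.1 1 else v) := by
    intro cp hr d v hc
    by_cases h : hr == hc
    · simp only [h, if_true, PySem.Dict.getD_insert_self, PySem.Dict.insert_insert_self,
        ← pvBranch_eq_bump]
      by_cases hcc : v.contains cp.1 <;> simp [hcc]
    · simp [h]
  have h2 : ∀ (cp : String × List String)
      (d : PySem.Dict String (PySem.Dict String Int)) (v : PySem.Dict String Int) (hr : String),
      (cp.2.foldl (fun count headersCor =>
          if hr == headersCor then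
            let inner := count.getD tp.1 PySem.Dict.empty
            if inner.contains cp.1 then
              count.insert tp.1 (inner.insert cp.1 (inner.getD cp.1 0 + 1))
            else
              count.insert tp.1 (inner.insert cp.1 1)
          else count) (d.insert tp.1 v))
        = d.insert tp.1 (cp.2.foldl (fun v hc => if hr == hc then pvBump v cp.1 1 else v) v) :=
    fun cp d v hr => pvLiftFold tp.1 cp.2 _ _ (h3 cp hr) d v
  have h1 : ∀ (d : PySem.Dict String (PySem.Dict String Int)) (v : PySem.Dict String Int)
      (cp : String × List String),
      (tp.2.foldl (fun count headersRef =>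
          cp.2.foldl (fun count headersCor =>
            if headersRef == headersCor then
              let inner := count.getD tp.1 PySem.Dict.empty
              if inner.contains cp.1 then
                count.insert tp.1 (inner.insert cp.1 (inner.getD cp.1 0 + 1))
              else
                count.insert tp.1 (inner.insert cp.1 1)
            else count) count) (d.insert tp.1 v))
        = d.insert tp.1 (tp.2.foldl (fun v hr => cp.2.foldl (fun v hc => if hr == hc then pvBump v cp.1 1 else v) v) v) :=
    fun d v cp => pvLiftFold tp.1 tp.2 _ _ (fun d v hr => h2 cp d v hr) d v
  rw [pvLiftFold tp.1 cor _ _ (fun d v cp => h1 d v cp) count PySem.Dict.empty]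
  congr 1
  unfold pvInnerDict
  apply PySem.List.foldl_congr_mem
  intro v cp _
  have hinner : ∀ hr (v : PySem.Dict String Int),
      cp.2.foldl (fun v hc => if hr == hc then pvBump v cp.1 1 else v) v
        = if cp.2.count hr = 0 then v else pvBump v cp.1 (cp.2.count hr) := by
    intro hr v
    have hcg := PySem.List.foldl_congr_mem cp.2
        (fun v hc => if hr == hc then pvBump v cp.1 1 else v)
        (fun v hc => if (if hr == hc then (1:Nat) else 0) = 0 then v else pvBump v cp.1 (if hr == hc then 1 else 0))
        v (fun v hc _ => by by_cases h : hr == hc <;> simp [h])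
    rw [hcg, pvFoldl_cond_bump, pvSum_ite_eq_count]
  have hmg := PySem.List.foldl_congr_mem tp.2
      (fun v hr => cp.2.foldl (fun v hc => if hr == hc then pvBump v cp.1 1 else v) v)
      (fun v hr => if cp.2.count hr = 0 then v else pvBump v cp.1 (cp.2.count hr))
      v (fun v hr _ => hinner hr v)
  rw [hmg, pvFoldl_cond_bump]
  rfl

theorem compareRefAndCorrectedHeaders_eq (ref cor : List (String × List String))
    (href : (ref.map Prod.fst).Nodup) :
    compareRefAndCorrectedHeaders ref cor
      = ref.map (fun tp => (tp.1, (pvInnerDict tp.2 cor).items)) := by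
  simp only [compareRefAndCorrectedHeaders]
  have hg := PySem.List.foldl_congr_mem ref
      (fun count tp =>
        cor.foldl (fun count cp =>
          tp.2.foldl (fun count headersRef =>
            cp.2.foldl (fun count headersCor =>
              if headersRef == headersCor then
                let inner := count.getD tp.1 PySem.Dict.empty
                if inner.contains cp.1 then
                  count.insert tp.1 (inner.insert cp.1 (inner.getD cp.1 0 + 1))
                else
                  count.insert tp.1 (inner.insert cp.1 1)
              else count) count) count) (count.insert tp.1 PySem.Dict.empty))
      (fun count tp => count.insert tp.1 (pvInnerDict tp.2 cor))
      PySem.Dict.empty (fun count tp _ => pvOuterStep cor tp count)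
  rw [hg, PySem.Dict.items_foldl_insert_fresh ref Prod.fst (fun tp => pvInnerDict tp.2 cor)
        PySem.Dict.empty (fun a _ => rfl) href]
  simp [PySem.Dict.empty, Function.comp_def]

-- flattened (header, corrected-type position) pairs of the corrected dict
def pvL (cor : List (String × List String)) : List (String × Int) :=
  (PySem.List.enumerate (cor.map Prod.snd)).flatMap (fun ph => ph.2.map (fun h => (h, ph.1)))

-- the position list B's inverted index stores for one header
def pvPos (cor : List (String × List String)) (h : String) : List Int :=
  ((pvL cor).filter (fun q => q.1 == h)).map (fun q => q.2)

-- all matching positions contributed by one ref header list (with multiplicity)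
def pvP (r : List String) (cor : List (String × List String)) : List Int :=
  r.flatMap (fun h => pvPos cor h)

theorem pvIndex_getD (cor : List (String × List String)) (h : String) :
    ((PySem.List.enumerate (cor.map Prod.snd)).foldl (fun index ph =>
        ph.2.foldl (fun index h => index.modify h [] (fun ps => ps ++ [ph.1])) index)
      (PySem.Dict.empty : PySem.Dict String (List Int))).getD h []
      = pvPos cor h := by
  have hflat :
      (PySem.List.enumerate (cor.map Prod.snd)).foldl (fun index ph =>
          ph.2.foldl (fun index h => index.modify h [] (fun ps => ps ++ [ph.1])) index)
        (PySem.Dict.empty : PySem.Dict String (List Int))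
      = (pvL cor).foldl (fun index q => index.modify q.1 [] (fun ps => ps ++ [q.2]))
          PySem.Dict.empty := by
    unfold pvL
    rw [List.foldl_flatMap]
    apply PySem.List.foldl_congr_mem
    intro acc ph _
    rw [List.foldl_map]
  rw [hflat, PySem.Dict.getD_foldl_modify_append]
  simp [pvPos]

theorem pvSum_enum_select (F : List String → Nat) :
    ∀ (vals : List (List String)) (s p : Int),
      ((PySem.List.enumerate vals s).map (fun ph => if ph.1 = p then F ph.2 else 0)).sum
        = if s ≤ p ∧ p < s + vals.length then F (vals.getD (p - s).toNat []) else 0 := by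
  intro vals
  induction vals with
  | nil =>
      intro s p
      rw [if_neg (by simp only [List.length_nil, Nat.cast_zero]; omega)]
      rfl
  | cons v vals ih =>
      intro s p
      rw [PySem.List.enumerate_cons]
      simp only [List.map_cons, List.sum_cons, ih (s + 1) p, List.length_cons]
      by_cases hp : s = p
      · subst hp
        rw [if_pos rfl, if_neg (by omega), if_pos (by push_cast; omega)]
        simp
      · rw [if_neg hp]
        by_cases hin : s + 1 ≤ p ∧ p < s + 1 + (vals.length : Int)
        · rw [if_pos hin, if_pos (by push_cast at hin ⊢; omega)]
          have hk : (p - s).toNat = (p - (s + 1)).toNat + 1 := by omega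
          rw [hk]
          simp
        · rw [if_neg hin, if_neg (by push_cast at hin ⊢; omega)]

theorem pvPos_count (cor : List (String × List String)) (h : String) (p : Int) :
    (pvPos cor h).count p
      = if 0 ≤ p ∧ p < (cor.length : Int) then ((cor.map Prod.snd).getD p.toNat []).count h
        else 0 := by
  unfold pvPos pvL
  rw [List.count_eq_countP, List.countP_map, List.countP_filter, List.countP_flatMap]
  have hmapeq : (PySem.List.enumerate (cor.map Prod.snd)).map
        ((List.countP fun a => ((fun x => x == p) ∘ fun q : String × Int => q.2) a && a.1 == h)
          ∘ fun ph : Int × List String => ph.2.map (fun h => (h, ph.1)))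
      = (PySem.List.enumerate (cor.map Prod.snd)).map
        (fun ph => if ph.1 = p then List.count h ph.2 else 0) := by
    apply List.map_congr_left
    intro ph _
    simp only [Function.comp_apply, List.countP_map]
    by_cases hq : ph.1 = p
    · rw [if_pos hq]
      rw [List.count_eq_countP]
      apply List.countP_congr
      intro x _
      simp [Function.comp_apply, hq]
    · rw [if_neg hq, List.countP_eq_zero.mpr]
      intro x _
      simp [Function.comp_apply, hq]
  rw [hmapeq, pvSum_enum_select (fun l => List.count h l) (cor.map Prod.snd) 0 p]
  simp

theorem pvInnerList_eq (r : List String) :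
    ∀ (cor : List (String × List String)),
      pvInnerList r cor
        = ((List.range cor.length).filter
              (fun k => decide (pvN r ((cor.map Prod.snd).getD k []) ≠ 0))).map
            (fun k => ((cor.map Prod.fst).getD k "",
                       (pvN r ((cor.map Prod.snd).getD k []) : Int))) := by
  intro cor
  induction cor using List.reverseRecOn with
  | nil => rfl
  | append_singleton cs c ih =>
      unfold pvInnerList at *
      rw [List.foldl_append]
      simp only [List.foldl_cons, List.foldl_nil]
      rw [ih]
      have hlen : (cs ++ [c]).length = cs.length + 1 := by simp
      rw [hlen, List.range_succ, List.filter_append, List.map_append]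
      have hsnd : ∀ k, k < cs.length →
          ((cs ++ [c]).map Prod.snd).getD k [] = (cs.map Prod.snd).getD k [] := by
        intro k hk
        rw [List.map_append, List.getD_append _ _ _ _ (by simpa using hk)]
      have hfst : ∀ k, k < cs.length →
          ((cs ++ [c]).map Prod.fst).getD k "" = (cs.map Prod.fst).getD k "" := by
        intro k hk
        rw [List.map_append, List.getD_append _ _ _ _ (by simpa using hk)]
      have hsndL : ((cs ++ [c]).map Prod.snd).getD cs.length [] = c.2 := by
        rw [List.map_append, List.getD_eq_getElem?_getD,
            List.getElem?_append_right (by simp)]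
        simp
      have hfstL : ((cs ++ [c]).map Prod.fst).getD cs.length "" = c.1 := by
        rw [List.map_append, List.getD_eq_getElem?_getD,
            List.getElem?_append_right (by simp)]
        simp
      have hfc : (List.range cs.length).filter
            (fun k => decide (pvN r (((cs ++ [c]).map Prod.snd).getD k []) ≠ 0))
          = (List.range cs.length).filter
            (fun k => decide (pvN r ((cs.map Prod.snd).getD k []) ≠ 0)) := by
        apply List.filter_congr
        intro k hk
        rw [hsnd k (List.mem_range.mp hk)]
      rw [hfc]
      have hM1 : List.map
            (fun k => (((cs ++ [c]).map Prod.fst).getD k "", (pvN r (((cs ++ [c]).map Prod.snd).getD k []) : Int)))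
            (List.filter (fun k => decide (pvN r ((cs.map Prod.snd).getD k []) ≠ 0)) (List.range cs.length))
          = List.map (fun k => ((cs.map Prod.fst).getD k "", (pvN r ((cs.map Prod.snd).getD k []) : Int)))
            (List.filter (fun k => decide (pvN r ((cs.map Prod.snd).getD k []) ≠ 0)) (List.range cs.length)) := by
        apply List.map_congr_left
        intro k hk
        have hk' : k < cs.length := List.mem_range.mp (List.mem_of_mem_filter hk)
        rw [hsnd k hk', hfst k hk']
      rw [hM1]
      by_cases h0 : pvN r c.2 = 0
      · rw [if_pos h0]
        simp [h0]
      · rw [if_neg h0]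
        simp [h0]

theorem pvP_count (r : List String) (cor : List (String × List String)) (p : Int) :
    (pvP r cor).count p
      = if 0 ≤ p ∧ p < (cor.length : Int) then pvN r ((cor.map Prod.snd).getD p.toNat [])
        else 0 := by
  unfold pvP
  rw [List.count_flatMap]
  have hpt : r.map (List.count p ∘ fun h => pvPos cor h)
      = r.map (fun h => if 0 ≤ p ∧ p < (cor.length : Int)
          then ((cor.map Prod.snd).getD p.toNat []).count h else 0) := by
    apply List.map_congr_left
    intro h _
    simpa using pvPos_count cor h p
  rw [hpt]
  by_cases hc : 0 ≤ p ∧ p < (cor.length : Int)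
  · simp only [if_pos hc]
    rfl
  · simp [hc]

theorem pvInnerB_eq (r : List String) (cor : List (String × List String))
    (hcor : (cor.map Prod.fst).Nodup) :
    ((PySem.List.sorted (PySem.Dict.counter (pvP r cor)).keys (fun x => x) false).foldl
        (fun inner pos => inner.insert ((PySem.List.pyGet? (cor.map Prod.fst) pos).getD "")
          ((PySem.Dict.counter (pvP r cor)).getD pos 0)) PySem.Dict.empty).items
      = pvInnerList r cor := by
  have hmemP : ∀ q : Int, q ∈ pvP r cor ↔
      (0 ≤ q ∧ q < (cor.length : Int) ∧ pvN r ((cor.map Prod.snd).getD q.toNat []) ≠ 0) := by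
    intro q
    rw [← List.count_pos_iff, pvP_count]
    by_cases hc : 0 ≤ q ∧ q < (cor.length : Int)
    · simp [hc]
      omega
    · simp [hc]
      omega
  have hkfun : ∀ k : Nat, k < cor.length →
      (PySem.List.pyGet? (cor.map Prod.fst) (k : Int)).getD "" = (cor.map Prod.fst).getD k "" := by
    intro k hk
    rw [PySem.List.pyGet?_natCast, List.getD_eq_getElem?_getD]
  have hsorted : PySem.List.sorted (PySem.Dict.counter (pvP r cor)).keys (fun x => x) false
      = List.map (fun k : Nat => (k : Int))
          ((List.range cor.length).filter
            (fun k => decide (pvN r ((cor.map Prod.snd).getD k []) ≠ 0))) := by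
    apply PySem.List.sorted_eq_of_perm_of_pairwise_lt
    · rw [PySem.Dict.keys_counter]
      apply (List.perm_ext_iff_of_nodup
        (List.Nodup.map_on (fun x _ y _ he => by exact_mod_cast he)
          (List.Nodup.filter _ List.nodup_range))
        (PySem.Set.nodup_ofList _)).mpr
      intro q
      rw [PySem.Set.mem_ofList, hmemP]
      simp only [List.mem_map, List.mem_filter, List.mem_range, decide_eq_true_eq]
      constructor
      · rintro ⟨k, ⟨hk, hn⟩, rfl⟩
        refine ⟨by omega, by exact_mod_cast hk, by simpa using hn⟩
      · rintro ⟨h0, hlt, hn⟩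
        exact ⟨q.toNat, ⟨by omega, hn⟩, by omega⟩
    · rw [List.pairwise_map]
      exact (List.Pairwise.sublist List.filter_sublist List.pairwise_lt_range).imp
        (fun h => by exact_mod_cast h)
  rw [hsorted,
      PySem.Dict.items_foldl_insert_fresh _
        (fun pos => (PySem.List.pyGet? (cor.map Prod.fst) pos).getD "")
        (fun pos => (PySem.Dict.counter (pvP r cor)).getD pos 0)
        PySem.Dict.empty (fun a _ => PySem.Dict.contains_empty _)
        (by
          rw [List.map_map]
          refine List.Nodup.map_on ?_ (List.Nodup.filter _ List.nodup_range)
          intro x hx y hy he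
          have hx' : x < cor.length := List.mem_range.mp (List.mem_of_mem_filter hx)
          have hy' : y < cor.length := List.mem_range.mp (List.mem_of_mem_filter hy)
          simp only [Function.comp_apply] at he
          rw [hkfun x hx', hkfun y hy'] at he
          have hlen : (cor.map Prod.fst).length = cor.length := by simp
          rw [List.getD_eq_getElem?_getD, List.getD_eq_getElem?_getD,
              List.getElem?_eq_getElem (by omega), List.getElem?_eq_getElem (by omega)] at he
          simp only [Option.getD_some] at he
          exact (List.Nodup.getElem_inj_iff hcor).mp he)]
  rw [List.map_map, pvInnerList_eq r cor,
      show (PySem.Dict.empty : PySem.Dict String Int).items = [] from rfl, List.nil_append]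
  apply List.map_congr_left
  intro k hk
  have hk' : k < cor.length := List.mem_range.mp (List.mem_of_mem_filter hk)
  simp only [Function.comp_apply]
  rw [hkfun k hk', PySem.Dict.getD_counter, pvP_count]
  rw [if_pos (by constructor <;> [omega; exact_mod_cast hk'])]
  simp

theorem pvTotals_eq (r : List String) (cor : List (String × List String)) :
    r.foldl (fun totals h => (pvPos cor h).foldl (fun totals pos =>
        totals.insert pos (totals.getD pos 0 + 1)) totals)
      (PySem.Dict.empty : PySem.Dict Int Int)
      = PySem.Dict.counter (pvP r cor) := by
  rw [← PySem.Dict.foldl_insert_getD_add_one_eq_counter]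
  unfold pvP
  rw [List.foldl_flatMap]

theorem compareRefAndCorrectedHeaders_alt_eq (ref cor : List (String × List String))
    (hcor : (cor.map Prod.fst).Nodup) :
    compareRefAndCorrectedHeaders_alt ref cor
      = ref.map (fun tp => (tp.1, pvInnerList tp.2 cor)) := by
  simp only [compareRefAndCorrectedHeaders_alt]
  simp only [pvIndex_getD, pvTotals_eq]
  have ho := PySem.List.foldl_append_singleton_eq_map
      (fun tp : String × List String => (tp.1,
        ((PySem.List.sorted (PySem.Dict.counter (pvP tp.2 cor)).keys (fun x => x) false).foldl
            (fun inner pos => inner.insert ((PySem.List.pyGet? (cor.map Prod.fst) pos).getD "")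
              ((PySem.Dict.counter (pvP tp.2 cor)).getD pos 0)) PySem.Dict.empty).items)) ref []
  rw [List.nil_append] at ho
  rw [ho]
  apply List.map_congr_left
  intro tp _
  rw [pvInnerB_eq tp.2 cor hcor]

theorem pvInner_eq (r : List String) (cor : List (String × List String))
    (hcor : (cor.map Prod.fst).Nodup) :
    pvInnerList r cor = (pvInnerDict r cor).items := by
  unfold pvInnerDict pvInnerList
  rw [pvInnerDict_items r cor PySem.Dict.empty (by simp) hcor
        (by intro cp _; exact PySem.Dict.contains_empty _)]
  rfl

-- ===== VERDICT (by name: the statement is the Claim_ definition above) =====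
theorem compareRefAndCorrectedHeaders_spec : Claim_equal_compareRefAndCorrectedHeaders := by
  intro ref cor _ hpre
  unfold Spec_compareRefAndCorrectedHeaders
  rw [compareRefAndCorrectedHeaders_eq ref cor hpre.1,
      compareRefAndCorrectedHeaders_alt_eq ref cor hpre.2]
  exact List.map_congr_left (fun tp _ => by rw [pvInner_eq tp.2 cor hpre.2])
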